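-- pv_equiv track=rewrite | github.com/sjogleka/General_codes | mutate_matrix.py | query_matrix
-- ===== SOURCE A (Python) =====
-- def rotateMatrix(mat, N):
--     for x in range(0, int(N / 2)):
--
--         for y in range(x, N - x - 1):
--             temp = mat[y][x]
--
--             mat[y][x] = mat[N - 1 - x][y]
--
--             mat[N - 1 - x][y] = mat[N - 1 - y][N - 1 - x]
--
--             mat[N - 1 - y][N - 1 - x] = mat[x][N - 1 - y]
--
--             mat[x][N - 1 - y] = temp
--     return mat
--
-- def flipimage(mat):
--     for i in range(len(mat)):
--         for j in range(i + 1):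
--             temp = mat[i][j]
--             mat[i][j] = mat[j][i]
--             mat[j][i] = temp
--     return mat
--
-- def flipimage2(mat):
--     for i in range(len(mat)):
--         for j in range(len(mat) - i):
--             tmp = mat[i][j];
--             mat[i][j] = mat[(len(mat) - 1) - j][(len(mat) - 1) - i];
--             mat[(len(mat) - 1) - j][(len(mat) - 1) - i] = tmp
--     return mat
--
-- def query_matrix(mat, q):
--     for i in range(len(q)):
--         if q[i] == 0:
--             mat = rotateMatrix(mat, len(mat))
--         elif q[i] == 1:
--             mat = flipimage(mat)
--         else:
--             mat = flipimage2(mat)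
--     return mat
-- ===== SOURCE B (Python) =====
-- def query_matrix(mat, q):
--     # Compose the queries into one D4 symmetry (swap, flip_row, flip_col), then
--     # apply the net transform in a single pass.  Does not mutate mat in place.
--     n = len(mat)
--     s = a = b = False  # net source map: src(i,j) = flip/swap of (i,j)
--     for op in q:
--         if op == 0:            # rotate clockwise: src(i,j) = (n-1-j, i)
--             s2, a2, b2 = True, True, False
--         elif op == 1:          # transpose: src(i,j) = (j, i)
--             s2, a2, b2 = True, False, False
--         else:                  # anti-transpose: src(i,j) = (n-1-j, n-1-i)
--             s2, a2, b2 = True, True, True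
--         if s:
--             s, a, b = (not s2), a ^ b2, b ^ a2
--         else:
--             s, a, b = s2, a ^ a2, b ^ b2
--     if not (s or a or b):      # net identity: nothing to do
--         return mat
--     out = []
--     for i in range(n):
--         row = []
--         for j in range(n):
--             p, t = (j, i) if s else (i, j)
--             r = n - 1 - p if a else p
--             c = n - 1 - t if b else t
--             row.append(mat[r][c])
--         out.append(row)
--     return out
-- ===== Notes on version B (the rewrite author's own statement) =====
-- stated objective: faster
-- what changed: Instead of executing each query as an in-place O(N^2) swap pass, B composes all queries into a single D4 symmetry (swap/flip-rows/flip-cols triple) in O(1) per query and applies the net transform in one pass over the matrix.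
-- outside the precondition, e.g. on query_matrix([[1, 2, 3], [4, 5, 6]], [1]): A returns [[1, 4, 3], [2, 5, 6]], B returns [[1, 4], [2, 5]]
import Mathlib
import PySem

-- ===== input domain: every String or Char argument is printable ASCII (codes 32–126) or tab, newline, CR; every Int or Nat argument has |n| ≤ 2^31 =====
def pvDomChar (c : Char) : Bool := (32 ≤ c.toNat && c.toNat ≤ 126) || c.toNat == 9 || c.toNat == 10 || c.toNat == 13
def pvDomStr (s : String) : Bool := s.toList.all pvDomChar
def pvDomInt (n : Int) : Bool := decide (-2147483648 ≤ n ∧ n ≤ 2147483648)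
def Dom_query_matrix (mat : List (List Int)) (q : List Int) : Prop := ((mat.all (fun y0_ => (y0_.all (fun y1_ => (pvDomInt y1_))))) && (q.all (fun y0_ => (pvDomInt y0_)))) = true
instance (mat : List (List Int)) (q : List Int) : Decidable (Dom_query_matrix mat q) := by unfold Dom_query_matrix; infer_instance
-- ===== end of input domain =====

-- B composes all queries into one D4 symmetry and applies it in a single pass
-- (objective: faster); A mutates mat in place and B does not, so the equivalence
-- proved here is about the RETURN value only.

-- ===== PORT A =====
-- mat[i][j] read / write (indices are always in range on Pre_ inputs)
def pvEntry (m : List (List Int)) (i j : Nat) : Int := (m.getD i []).getD j 0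
def pvSet (m : List (List Int)) (i j : Nat) (v : Int) : List (List Int) :=
  m.set i ((m.getD i []).set j v)

-- body of the inner loop of rotateMatrix (the four-cell cycle)
def rotBody (N : Nat) (m : List (List Int)) (x y : Nat) : List (List Int) :=
  let temp := pvEntry m y x
  let m1 := pvSet m y x (pvEntry m (N-1-x) y)
  let m2 := pvSet m1 (N-1-x) y (pvEntry m1 (N-1-y) (N-1-x))
  let m3 := pvSet m2 (N-1-y) (N-1-x) (pvEntry m2 x (N-1-y))
  pvSet m3 x (N-1-y) temp

-- range(x, N-x-1) over non-negative bounds = List.range' x (N-x-1-x)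
def rotateMatrixPort (mat : List (List Int)) (N : Nat) : List (List Int) :=
  (List.range (N/2)).foldl
    (fun m x => (List.range' x (N - x - 1 - x)).foldl (fun m' y => rotBody N m' x y) m) mat

def flipBody (m : List (List Int)) (i j : Nat) : List (List Int) :=
  let temp := pvEntry m i j
  let m1 := pvSet m i j (pvEntry m j i)
  pvSet m1 j i temp

def flipimagePort (mat : List (List Int)) : List (List Int) :=
  (List.range mat.length).foldl
    (fun m i => (List.range (i+1)).foldl (fun m' j => flipBody m' i j) m) mat

def flip2Body (m : List (List Int)) (i j : Nat) : List (List Int) :=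
  let N := m.length
  let tmp := pvEntry m i j
  let m1 := pvSet m i j (pvEntry m (N-1-j) (N-1-i))
  pvSet m1 (N-1-j) (N-1-i) tmp

def flipimage2Port (mat : List (List Int)) : List (List Int) :=
  (List.range mat.length).foldl
    (fun m i => (List.range (mat.length - i)).foldl (fun m' j => flip2Body m' i j) m) mat

def query_matrix (mat : List (List Int)) (q : List Int) : List (List Int) :=
  q.foldl (fun m qi =>
    if qi == 0 then rotateMatrixPort m m.length
    else if qi == 1 then flipimagePort m
    else flipimage2Port m) mat

-- ===== PORT B =====
-- the (s2, a2, b2) triple chosen for one query in Source B's loop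
def opTriple (op : Int) : Bool × Bool × Bool :=
  if op == 0 then (true, true, false)
  else if op == 1 then (true, false, false)
  else (true, true, true)

-- Source B's update of the net (s, a, b) triple by one query's triple
def composeT (t g : Bool × Bool × Bool) : Bool × Bool × Bool :=
  if t.1 then (!g.1, xor t.2.1 g.2.2, xor t.2.2 g.2.1)
  else (g.1, xor t.2.1 g.2.1, xor t.2.2 g.2.2)

-- the (r, c) source index computed in Source B's inner loop
def srcT (n : Nat) (t : Bool × Bool × Bool) (i j : Nat) : Nat × Nat :=
  let p := if t.1 then j else i
  let c := if t.1 then i else j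
  (if t.2.1 then n - 1 - p else p, if t.2.2 then n - 1 - c else c)

def query_matrix_alt (mat : List (List Int)) (q : List Int) : List (List Int) :=
  let n := mat.length
  let t := q.foldl (fun t op => composeT t (opTriple op)) (false, false, false)
  if t = (false, false, false) then mat
  else (List.range n).map (fun i => (List.range n).map (fun j =>
    let rc := srcT n t i j
    pvEntry mat rc.1 rc.2))

-- ===== PRECONDITION & SPEC =====
-- Pre_ excludes non-square matrices combined with a non-empty query list: there A
-- either raises IndexError (a row shorter than len(mat)) or its in-place swaps act
-- only on the top-left len(mat)×len(mat) block, leaving overhanging row entries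
-- untouched — an artefact of the in-place algorithm no caller would specify; B
-- treats the matrix as square.
def Pre_query_matrix (mat : List (List Int)) (q : List Int) : Prop :=
  q = [] ∨ ∀ r ∈ mat, r.length = mat.length
instance (mat : List (List Int)) (q : List Int) : Decidable (Pre_query_matrix mat q) := by
  unfold Pre_query_matrix; infer_instance
def pvWitness_query_matrix : List (List Int) × List Int := ([[1, 2], [3, 4]], [0, 1, 2, 0])

def Spec_query_matrix (mat : List (List Int)) (q : List Int) (out : List (List Int)) : Prop := out = query_matrix_alt mat q
instance (mat : List (List Int)) (q : List Int) (out : List (List Int)) : Decidable (Spec_query_matrix mat q out) := by unfold Spec_query_matrix; infer_instance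

-- ===== CLAIM (what is proved, stated in full; the proofs are below) =====
def Claim_equal_query_matrix : Prop := ∀ (mat : List (List Int)) (q : List Int), Dom_query_matrix mat q → Pre_query_matrix mat q → Spec_query_matrix mat q (query_matrix mat q)

-- ===== LEMMAS AND PROOFS =====

-- a square matrix of size n
def Sq (m : List (List Int)) (n : Nat) : Prop := m.length = n ∧ ∀ r ∈ m, r.length = n

theorem sq_pvSet {m : List (List Int)} {n i j : Nat} (v : Int) (h : Sq m n) :
    Sq (pvSet m i j v) n := by
  obtain ⟨hl, hr⟩ := h
  rcases Nat.lt_or_ge i m.length with hi | hi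
  · refine ⟨by simpa [pvSet] using hl, ?_⟩
    intro r hrm
    rcases List.mem_or_eq_of_mem_set hrm with h' | h'
    · exact hr r h'
    · subst h'
      rw [List.length_set, List.getD_eq_getElem m [] hi]
      exact hr _ (List.getElem_mem hi)
  · have hno : pvSet m i j v = m := by
      unfold pvSet; exact List.set_eq_of_length_le hi
    rw [hno]; exact ⟨hl, hr⟩

theorem getD_set_self {α : Type} (l : List α) (i : Nat) (v d : α) (h : i < l.length) :
    (l.set i v).getD i d = v := by
  rw [List.getD_eq_getElem?_getD, List.getElem?_set_self h]; rfl

theorem getD_set_ne {α : Type} (l : List α) {i k : Nat} (v d : α) (h : i ≠ k) :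
    (l.set i v).getD k d = l.getD k d := by
  rw [List.getD_eq_getElem?_getD, List.getElem?_set_ne h, ← List.getD_eq_getElem?_getD]

theorem entry_pvSet_same {m : List (List Int)} {n i j : Nat} (v : Int)
    (h : Sq m n) (hi : i < n) (hj : j < n) :
    pvEntry (pvSet m i j v) i j = v := by
  obtain ⟨hl, hr⟩ := h
  have him : i < m.length := by omega
  have hrowlen : (m.getD i []).length = n := by
    rw [List.getD_eq_getElem m [] him]; exact hr _ (List.getElem_mem him)
  unfold pvEntry pvSet
  rw [getD_set_self _ _ _ _ him, getD_set_self _ _ _ _ (by omega)]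

theorem entry_pvSet_ne {m : List (List Int)} {n i j a b : Nat} (v : Int)
    (h : Sq m n) (hi : i < n) (hne : ¬(a = i ∧ b = j)) :
    pvEntry (pvSet m i j v) a b = pvEntry m a b := by
  by_cases hai : a = i
  · subst hai
    have hbj : b ≠ j := fun hh => hne ⟨rfl, hh⟩
    have him : a < m.length := by have := h.1; omega
    unfold pvEntry pvSet
    rw [getD_set_self _ _ _ _ him, getD_set_ne _ _ _ (Ne.symm hbj)]
  · unfold pvEntry pvSet
    rw [getD_set_ne _ _ _ (fun hh => hai hh.symm)]

theorem sq_ext {m m' : List (List Int)} {n : Nat} (h : Sq m n) (h' : Sq m' n)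
    (he : ∀ a b, a < n → b < n → pvEntry m a b = pvEntry m' a b) : m = m' := by
  have hln := h.1
  have hln' := h'.1
  apply List.ext_getElem (by omega)
  intro i h1 h2
  have hi : i < n := by omega
  have hrl : m[i].length = n := h.2 _ (List.getElem_mem h1)
  have hrl' : m'[i].length = n := h'.2 _ (List.getElem_mem h2)
  apply List.ext_getElem (by rw [hrl, hrl'])
  intro j hj1 hj2
  have hj : j < n := by omega
  have := he i j hi hj
  unfold pvEntry at this
  rw [List.getD_eq_getElem m [] h1, List.getD_eq_getElem m' [] h2,
    List.getD_eq_getElem _ 0 (by omega), List.getD_eq_getElem _ 0 (by omega)] at this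
  exact this

-- fold over range' with an index-parametrised invariant
theorem foldl_range'_inv {α : Type} (f : α → Nat → α) (P : Nat → α → Prop) :
    ∀ (len start : Nat) (a : α), P start a →
      (∀ y b, start ≤ y → y < start + len → P y b → P (y+1) (f b y)) →
      P (start + len) ((List.range' start len).foldl f a) := by
  intro len
  induction len with
  | zero => intro start a h _; simpa using h
  | succ k ih =>
    intro start a h hstep
    have h1 : P (start + 1) (f a start) := hstep start a le_rfl (by omega) h
    have := ih (start + 1) (f a start) h1
      (fun y b hy1 hy2 hp => hstep y b (by omega) (by omega) hp)
    have e : start + 1 + k = start + (k + 1) := by omega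
    rw [List.range'_succ]
    simpa [e] using this

-- "the matrix agrees with source-map σ of m0 on processed cells, with m0 elsewhere"
def EntSpec (m0 m : List (List Int)) (n : Nat) (P : Nat → Nat → Prop)
    (σ : Nat → Nat → Nat × Nat) : Prop :=
  Sq m n ∧ ∀ a b, a < n → b < n →
    (P a b → pvEntry m a b = pvEntry m0 (σ a b).1 (σ a b).2) ∧
    (¬ P a b → pvEntry m a b = pvEntry m0 a b)

theorem entSpec_iff {m0 m : List (List Int)} {n : Nat} {P P' : Nat → Nat → Prop}
    {σ : Nat → Nat → Nat × Nat} (hiff : ∀ a b, a < n → b < n → (P a b ↔ P' a b))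
    (h : EntSpec m0 m n P σ) : EntSpec m0 m n P' σ :=
  ⟨h.1, fun a b ha hb =>
    ⟨fun hp => (h.2 a b ha hb).1 ((hiff a b ha hb).2 hp),
     fun hp => (h.2 a b ha hb).2 (fun hq => hp ((hiff a b ha hb).1 hq))⟩⟩

-- source maps of the three operations
def sigR (n a b : Nat) : Nat × Nat := (n-1-b, a)
def sigT (a b : Nat) : Nat × Nat := (b, a)
def sigAT (n a b : Nat) : Nat × Nat := (n-1-b, n-1-a)

-- processed-cell predicates for the three swap loops
def tProc (k l a b : Nat) : Prop := (a < k ∧ b < k) ∨ (a = k ∧ b < l) ∨ (b = k ∧ a < l)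

def atProc (n k l a b : Nat) : Prop :=
  (a + b + 1 ≤ n ∧ (a < k ∨ (a = k ∧ b < l))) ∨
  (n ≤ a + b + 1 ∧ (n-1-b < k ∨ (n-1-b = k ∧ n-1-a < l)))

def rotDone (x0 y0 x y : Nat) : Prop := x < x0 ∨ (x = x0 ∧ y < y0)

def rProc (n x0 y0 a b : Nat) : Prop :=
  (b ≤ a ∧ a + b + 2 ≤ n ∧ rotDone x0 y0 b a) ∨
  (b < a ∧ n ≤ a + b + 1 ∧ rotDone x0 y0 (n-1-a) b) ∨
  (a ≤ b ∧ n ≤ a + b ∧ rotDone x0 y0 (n-1-b) (n-1-a)) ∨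
  (a < b ∧ a + b + 1 ≤ n ∧ rotDone x0 y0 a (n-1-b))

-- one transpose swap
theorem flip_step {m0 m : List (List Int)} {n k j : Nat} (hk : k < n) (hj : j ≤ k)
    (h : EntSpec m0 m n (tProc k j) sigT) :
    EntSpec m0 (flipBody m k j) n (tProc k (j+1)) sigT := by
  obtain ⟨hsq, he⟩ := h
  have hjn : j < n := by omega
  have hbody : flipBody m k j = pvSet (pvSet m k j (pvEntry m j k)) j k (pvEntry m k j) := by
    simp only [flipBody]
  have hsq1 : Sq (pvSet m k j (pvEntry m j k)) n := sq_pvSet _ hsq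
  have hc1 : ¬ tProc k j k j := by unfold tProc; omega
  have hc2 : ¬ tProc k j j k := by unfold tProc; omega
  have e1 : pvEntry m k j = pvEntry m0 k j := (he k j hk hjn).2 hc1
  have e2 : pvEntry m j k = pvEntry m0 j k := (he j k hjn hk).2 hc2
  rw [hbody]
  refine ⟨sq_pvSet _ hsq1, ?_⟩
  intro a b ha hb
  by_cases h2 : a = j ∧ b = k
  · obtain ⟨rfl, rfl⟩ := h2
    rw [entry_pvSet_same _ hsq1 hjn hk, e1]
    refine ⟨fun _ => rfl, fun hcon => absurd (by unfold tProc; omega) hcon⟩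
  · rw [entry_pvSet_ne _ hsq1 hjn h2]
    by_cases h1 : a = k ∧ b = j
    · obtain ⟨rfl, rfl⟩ := h1
      rw [entry_pvSet_same _ hsq hk hjn, e2]
      refine ⟨fun _ => rfl, fun hcon => absurd (by unfold tProc; omega) hcon⟩
    · rw [entry_pvSet_ne _ hsq hk h1]
      have hiff : tProc k (j+1) a b ↔ tProc k j a b := by unfold tProc; omega
      exact ⟨fun hp => (he a b ha hb).1 (hiff.1 hp),
             fun hp => (he a b ha hb).2 (fun hq => hp (hiff.2 hq))⟩

theorem flip_spec {m : List (List Int)} {n : Nat} (h : Sq m n) :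
    Sq (flipimagePort m) n ∧ ∀ a b, a < n → b < n →
      pvEntry (flipimagePort m) a b = pvEntry m b a := by
  have h0 : EntSpec m m n (tProc 0 0) sigT :=
    ⟨h, fun a b ha hb => ⟨fun hp => absurd hp (by unfold tProc; omega), fun _ => rfl⟩⟩
  have main : EntSpec m (flipimagePort m) n (tProc n 0) sigT := by
    unfold flipimagePort
    rw [h.1, List.range_eq_range']
    have step : ∀ (k : Nat) (mm : List (List Int)), 0 ≤ k → k < 0 + n →
        EntSpec m mm n (tProc k 0) sigT →
        EntSpec m ((List.range (k+1)).foldl (fun m' j => flipBody m' k j) mm) n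
          (tProc (k+1) 0) sigT := by
      intro k mm _ hk hmm
      have hkn : k < n := by omega
      rw [List.range_eq_range']
      have instep : ∀ (j : Nat) (m' : List (List Int)), 0 ≤ j → j < 0 + (k+1) →
          EntSpec m m' n (tProc k j) sigT → EntSpec m (flipBody m' k j) n (tProc k (j+1)) sigT :=
        fun j m' _ hj hm' => flip_step hkn (by omega) hm'
      have := foldl_range'_inv (fun m' j => flipBody m' k j)
        (fun l m' => EntSpec m m' n (tProc k l) sigT) (k+1) 0 mm hmm instep
      simp only [Nat.zero_add] at this
      exact entSpec_iff (fun a b ha hb => by unfold tProc; omega) this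
    have := foldl_range'_inv _ (fun k mm => EntSpec m mm n (tProc k 0) sigT) n 0 m h0 step
    simpa using this
  refine ⟨main.1, fun a b ha hb => ?_⟩
  simpa [sigT] using (main.2 a b ha hb).1 (by unfold tProc; omega)

-- one anti-transpose swap
theorem flip2_step {m0 m : List (List Int)} {n k j : Nat} (hk : k < n) (hj : j < n - k)
    (h : EntSpec m0 m n (atProc n k j) (sigAT n)) :
    EntSpec m0 (flip2Body m k j) n (atProc n k (j+1)) (sigAT n) := by
  obtain ⟨hsq, he⟩ := h
  have hjn : j < n := by omega
  have hnj : n-1-j < n := by omega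
  have hnk : n-1-k < n := by omega
  have hbody : flip2Body m k j =
      pvSet (pvSet m k j (pvEntry m (n-1-j) (n-1-k))) (n-1-j) (n-1-k) (pvEntry m k j) := by
    simp only [flip2Body, hsq.1]
  have hsq1 : Sq (pvSet m k j (pvEntry m (n-1-j) (n-1-k))) n := sq_pvSet _ hsq
  have hc1 : ¬ atProc n k j k j := by unfold atProc; omega
  have hc2 : ¬ atProc n k j (n-1-j) (n-1-k) := by unfold atProc; omega
  have e1 : pvEntry m k j = pvEntry m0 k j := (he k j hk hjn).2 hc1
  have e2 : pvEntry m (n-1-j) (n-1-k) = pvEntry m0 (n-1-j) (n-1-k) := (he _ _ hnj hnk).2 hc2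
  rw [hbody]
  refine ⟨sq_pvSet _ hsq1, ?_⟩
  intro a b ha hb
  by_cases h2 : a = n-1-j ∧ b = n-1-k
  · obtain ⟨rfl, rfl⟩ := h2
    rw [entry_pvSet_same _ hsq1 hnj hnk, e1]
    constructor
    · intro _
      simp only [sigAT]
      have ea : n-1-(n-1-k) = k := by omega
      have eb : n-1-(n-1-j) = j := by omega
      rw [ea, eb]
    · intro hcon; exact absurd (by unfold atProc; omega) hcon
  · rw [entry_pvSet_ne _ hsq1 hnj h2]
    by_cases h1 : a = k ∧ b = j
    · obtain ⟨rfl, rfl⟩ := h1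
      rw [entry_pvSet_same _ hsq hk hjn, e2]
      refine ⟨fun _ => rfl, fun hcon => absurd (by unfold atProc; omega) hcon⟩
    · rw [entry_pvSet_ne _ hsq hk h1]
      have hiff : atProc n k (j+1) a b ↔ atProc n k j a b := by unfold atProc; omega
      exact ⟨fun hp => (he a b ha hb).1 (hiff.1 hp),
             fun hp => (he a b ha hb).2 (fun hq => hp (hiff.2 hq))⟩

theorem flip2_spec {m : List (List Int)} {n : Nat} (h : Sq m n) :
    Sq (flipimage2Port m) n ∧ ∀ a b, a < n → b < n →
      pvEntry (flipimage2Port m) a b = pvEntry m (n-1-b) (n-1-a) := by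
  have h0 : EntSpec m m n (atProc n 0 0) (sigAT n) :=
    ⟨h, fun a b ha hb => ⟨fun hp => absurd hp (by unfold atProc; omega), fun _ => rfl⟩⟩
  have main : EntSpec m (flipimage2Port m) n (atProc n n 0) (sigAT n) := by
    unfold flipimage2Port
    rw [h.1, List.range_eq_range']
    have step : ∀ (k : Nat) (mm : List (List Int)), 0 ≤ k → k < 0 + n →
        EntSpec m mm n (atProc n k 0) (sigAT n) →
        EntSpec m ((List.range (n - k)).foldl (fun m' j => flip2Body m' k j) mm) n
          (atProc n (k+1) 0) (sigAT n) := by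
      intro k mm _ hk hmm
      have hkn : k < n := by omega
      rw [List.range_eq_range']
      have instep : ∀ (j : Nat) (m' : List (List Int)), 0 ≤ j → j < 0 + (n - k) →
          EntSpec m m' n (atProc n k j) (sigAT n) →
          EntSpec m (flip2Body m' k j) n (atProc n k (j+1)) (sigAT n) :=
        fun j m' _ hj hm' => flip2_step hkn (by omega) hm'
      have := foldl_range'_inv (fun m' j => flip2Body m' k j)
        (fun l m' => EntSpec m m' n (atProc n k l) (sigAT n)) (n - k) 0 mm hmm instep
      simp only [Nat.zero_add] at this
      exact entSpec_iff (fun a b ha hb => by unfold atProc; omega) this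
    have := foldl_range'_inv _ (fun k mm => EntSpec m mm n (atProc n k 0) (sigAT n)) n 0 m h0 step
    simpa using this
  refine ⟨main.1, fun a b ha hb => ?_⟩
  simpa [sigAT] using (main.2 a b ha hb).1 (by unfold atProc; omega)

-- arithmetic facts about the rotation's processed-cell predicate
theorem rproc_zero {n a b : Nat} : ¬ rProc n 0 0 a b := by
  intro h; unfold rProc rotDone at h; omega

theorem rproc_c1 {n x y : Nat} (_hx : 2*x+2 ≤ n) (hxy : x ≤ y) (hyn : x + y + 2 ≤ n) :
    ¬ rProc n x y y x := by intro h; unfold rProc rotDone at h; omega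

theorem rproc_c2 {n x y : Nat} (_hx : 2*x+2 ≤ n) (hxy : x ≤ y) (hyn : x + y + 2 ≤ n) :
    ¬ rProc n x y (n-1-x) y := by intro h; unfold rProc rotDone at h; omega

theorem rproc_c3 {n x y : Nat} (_hx : 2*x+2 ≤ n) (hxy : x ≤ y) (hyn : x + y + 2 ≤ n) :
    ¬ rProc n x y (n-1-y) (n-1-x) := by intro h; unfold rProc rotDone at h; omega

theorem rproc_c4 {n x y : Nat} (_hx : 2*x+2 ≤ n) (hxy : x ≤ y) (hyn : x + y + 2 ≤ n) :
    ¬ rProc n x y x (n-1-y) := by intro h; unfold rProc rotDone at h; omega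

theorem rproc_n1 {n x y : Nat} (_hx : 2*x+2 ≤ n) (hxy : x ≤ y) (hyn : x + y + 2 ≤ n) :
    rProc n x (y+1) y x := by unfold rProc rotDone; exact Or.inl (by omega)

theorem rproc_n2 {n x y : Nat} (hx : 2*x+2 ≤ n) (hxy : x ≤ y) (hyn : x + y + 2 ≤ n) :
    rProc n x (y+1) (n-1-x) y := by unfold rProc rotDone; exact Or.inr (Or.inl (by omega))

theorem rproc_n3 {n x y : Nat} (hx : 2*x+2 ≤ n) (hxy : x ≤ y) (hyn : x + y + 2 ≤ n) :
    rProc n x (y+1) (n-1-y) (n-1-x) := by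
  unfold rProc rotDone; exact Or.inr (Or.inr (Or.inl (by omega)))

theorem rproc_n4 {n x y : Nat} (_hx : 2*x+2 ≤ n) (hxy : x ≤ y) (hyn : x + y + 2 ≤ n) :
    rProc n x (y+1) x (n-1-y) := by
  unfold rProc rotDone; exact Or.inr (Or.inr (Or.inr (by omega)))

theorem rproc_iff {n x y a b : Nat} (hx : 2*x+2 ≤ n) (hxy : x ≤ y) (hyn : x + y + 2 ≤ n)
    (ha : a < n) (hb : b < n)
    (h4 : ¬(a = x ∧ b = n-1-y)) (h3 : ¬(a = n-1-y ∧ b = n-1-x))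
    (h2 : ¬(a = n-1-x ∧ b = y)) (h1 : ¬(a = y ∧ b = x)) :
    rProc n x (y+1) a b ↔ rProc n x y a b := by
  unfold rProc rotDone
  constructor
  · rintro (h|h|h|h)
    · exact Or.inl (by omega)
    · exact Or.inr (Or.inl (by omega))
    · exact Or.inr (Or.inr (Or.inl (by omega)))
    · exact Or.inr (Or.inr (Or.inr (by omega)))
  · rintro (h|h|h|h)
    · exact Or.inl (by omega)
    · exact Or.inr (Or.inl (by omega))
    · exact Or.inr (Or.inr (Or.inl (by omega)))
    · exact Or.inr (Or.inr (Or.inr (by omega)))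

theorem rproc_wrap {n x a b : Nat} (hx : 2*x+2 ≤ n) (ha : a < n) (hb : b < n) :
    rProc n x (x + (n - x - 1 - x)) a b ↔ rProc n (x+1) (x+1) a b := by
  unfold rProc rotDone
  constructor
  · rintro (h|h|h|h)
    · exact Or.inl (by omega)
    · exact Or.inr (Or.inl (by omega))
    · exact Or.inr (Or.inr (Or.inl (by omega)))
    · exact Or.inr (Or.inr (Or.inr (by omega)))
  · rintro (h|h|h|h)
    · exact Or.inl (by omega)
    · exact Or.inr (Or.inl (by omega))
    · exact Or.inr (Or.inr (Or.inl (by omega)))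
    · exact Or.inr (Or.inr (Or.inr (by omega)))

theorem rproc_final {n a b : Nat} (ha : a < n) (hb : b < n)
    (h : ¬ rProc n (n/2) (n/2) a b) : 2*a+1 = n ∧ 2*b+1 = n := by
  unfold rProc rotDone at h; omega

-- one four-cell rotation cycle
theorem rot_step {m0 m : List (List Int)} {n x y : Nat}
    (hx : 2*x+2 ≤ n) (hxy : x ≤ y) (hyn : x + y + 2 ≤ n)
    (h : EntSpec m0 m n (rProc n x y) (sigR n)) :
    EntSpec m0 (rotBody n m x y) n (rProc n x (y+1)) (sigR n) := by
  obtain ⟨hsq, he⟩ := h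
  have hyn' : y < n := by omega
  have hxn : x < n := by omega
  have hnx : n-1-x < n := by omega
  have hny : n-1-y < n := by omega
  have e1 : pvEntry m y x = pvEntry m0 y x := (he y x hyn' hxn).2 (rproc_c1 hx hxy hyn)
  have e2 : pvEntry m (n-1-x) y = pvEntry m0 (n-1-x) y := (he _ _ hnx hyn').2 (rproc_c2 hx hxy hyn)
  have e3 : pvEntry m (n-1-y) (n-1-x) = pvEntry m0 (n-1-y) (n-1-x) :=
    (he _ _ hny hnx).2 (rproc_c3 hx hxy hyn)
  have e4 : pvEntry m x (n-1-y) = pvEntry m0 x (n-1-y) := (he _ _ hxn hny).2 (rproc_c4 hx hxy hyn)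
  simp only [rotBody]
  set A1 := pvSet m y x (pvEntry m (n-1-x) y) with hA1
  set A2 := pvSet A1 (n-1-x) y (pvEntry A1 (n-1-y) (n-1-x)) with hA2
  set A3 := pvSet A2 (n-1-y) (n-1-x) (pvEntry A2 x (n-1-y)) with hA3
  clear_value A1 A2 A3
  have hsq1 : Sq A1 n := by rw [hA1]; exact sq_pvSet _ hsq
  have hsq2 : Sq A2 n := by rw [hA2]; exact sq_pvSet _ hsq1
  have hsq3 : Sq A3 n := by rw [hA3]; exact sq_pvSet _ hsq2
  -- reads inside the body see still-original cells
  have eA1c3 : pvEntry A1 (n-1-y) (n-1-x) = pvEntry m (n-1-y) (n-1-x) := by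
    rw [hA1]; exact entry_pvSet_ne _ hsq hyn' (by omega)
  have eA2c4 : pvEntry A2 x (n-1-y) = pvEntry m x (n-1-y) := by
    rw [hA2]
    exact (entry_pvSet_ne _ hsq1 hnx (by omega)).trans
      (by rw [hA1]; exact entry_pvSet_ne _ hsq hyn' (by omega))
  refine ⟨sq_pvSet _ hsq3, ?_⟩
  intro a b ha hb
  by_cases h4 : a = x ∧ b = n-1-y
  · obtain ⟨rfl, rfl⟩ := h4
    rw [entry_pvSet_same _ hsq3 hxn hny, e1]
    constructor
    · intro _
      simp only [sigR]
      have ey : n-1-(n-1-y) = y := by omega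
      rw [ey]
    · intro hcon; exact absurd (rproc_n4 hx hxy hyn) hcon
  · rw [entry_pvSet_ne _ hsq3 hxn h4]
    by_cases h3 : a = n-1-y ∧ b = n-1-x
    · obtain ⟨rfl, rfl⟩ := h3
      rw [hA3, entry_pvSet_same _ hsq2 hny hnx, eA2c4, e4]
      constructor
      · intro _
        simp only [sigR]
        have ex : n-1-(n-1-x) = x := by omega
        rw [ex]
      · intro hcon; exact absurd (rproc_n3 hx hxy hyn) hcon
    · rw [hA3, entry_pvSet_ne _ hsq2 hny h3]
      by_cases h2 : a = n-1-x ∧ b = y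
      · obtain ⟨rfl, rfl⟩ := h2
        rw [hA2, entry_pvSet_same _ hsq1 hnx hyn', eA1c3, e3]
        refine ⟨fun _ => rfl, fun hcon => absurd (rproc_n2 hx hxy hyn) hcon⟩
      · rw [hA2, entry_pvSet_ne _ hsq1 hnx h2]
        by_cases h1 : a = y ∧ b = x
        · obtain ⟨rfl, rfl⟩ := h1
          rw [hA1, entry_pvSet_same _ hsq hyn' hxn, e2]
          refine ⟨fun _ => rfl, fun hcon => absurd (rproc_n1 hx hxy hyn) hcon⟩
        · rw [hA1, entry_pvSet_ne _ hsq hyn' h1]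
          have hiff := rproc_iff hx hxy hyn ha hb h4 h3 h2 h1
          exact ⟨fun hp => (he a b ha hb).1 (hiff.1 hp),
                 fun hp => (he a b ha hb).2 (fun hq => hp (hiff.2 hq))⟩

theorem rot_spec {m : List (List Int)} {n : Nat} (h : Sq m n) :
    Sq (rotateMatrixPort m n) n ∧ ∀ a b, a < n → b < n →
      pvEntry (rotateMatrixPort m n) a b = pvEntry m (n-1-b) a := by
  have h0 : EntSpec m m n (rProc n 0 0) (sigR n) :=
    ⟨h, fun a b ha hb => ⟨fun hp => absurd hp rproc_zero, fun _ => rfl⟩⟩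
  have main : EntSpec m (rotateMatrixPort m n) n (rProc n (n/2) (n/2)) (sigR n) := by
    unfold rotateMatrixPort
    rw [List.range_eq_range']
    have step : ∀ (x : Nat) (mm : List (List Int)), 0 ≤ x → x < 0 + n/2 →
        EntSpec m mm n (rProc n x x) (sigR n) →
        EntSpec m ((List.range' x (n - x - 1 - x)).foldl (fun m' y => rotBody n m' x y) mm) n
          (rProc n (x+1) (x+1)) (sigR n) := by
      intro x mm _ hx hmm
      have hx2 : 2*x+2 ≤ n := by omega
      have instep : ∀ (y : Nat) (m' : List (List Int)), x ≤ y → y < x + (n - x - 1 - x) →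
          EntSpec m m' n (rProc n x y) (sigR n) →
          EntSpec m (rotBody n m' x y) n (rProc n x (y+1)) (sigR n) :=
        fun y m' hy1 hy2 hm' => rot_step hx2 hy1 (by omega) hm'
      have := foldl_range'_inv (fun m' y => rotBody n m' x y)
        (fun l m' => EntSpec m m' n (rProc n x l) (sigR n)) (n - x - 1 - x) x mm hmm instep
      exact entSpec_iff (fun a b ha hb => rproc_wrap hx2 ha hb) this
    have := foldl_range'_inv _ (fun x mm => EntSpec m mm n (rProc n x x) (sigR n)) (n/2) 0 m h0 step
    simpa using this
  refine ⟨main.1, fun a b ha hb => ?_⟩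
  by_cases hp : rProc n (n/2) (n/2) a b
  · simpa [sigR] using (main.2 a b ha hb).1 hp
  · have hcenter := rproc_final ha hb hp
    rw [(main.2 a b ha hb).2 hp]
    have e1 : n-1-b = a := by omega
    have e2 : a = b := by omega
    rw [e1, ← e2]

-- ===== the B side: one-pass application of a composed triple =====

def netT (q : List Int) : Bool × Bool × Bool :=
  q.foldl (fun t op => composeT t (opTriple op)) (false, false, false)

def applyT (n : Nat) (mat : List (List Int)) (t : Bool × Bool × Bool) : List (List Int) :=
  (List.range n).map (fun i => (List.range n).map (fun j =>
    let rc := srcT n t i j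
    pvEntry mat rc.1 rc.2))

theorem sq_applyT {n : Nat} {mat : List (List Int)} {t : Bool × Bool × Bool} :
    Sq (applyT n mat t) n := by
  constructor
  · simp [applyT]
  · intro r hr
    simp only [applyT, List.mem_map] at hr
    obtain ⟨i, _, rfl⟩ := hr
    simp

theorem getD_map_range {α : Type} (f : Nat → α) (n a : Nat) (d : α) (ha : a < n) :
    ((List.range n).map f).getD a d = f a := by
  rw [List.getD_eq_getElem?_getD, List.getElem?_map, List.getElem?_range ha]; rfl

theorem entry_applyT {n : Nat} {mat : List (List Int)} {t : Bool × Bool × Bool} {a b : Nat}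
    (ha : a < n) (hb : b < n) :
    pvEntry (applyT n mat t) a b = pvEntry mat (srcT n t a b).1 (srcT n t a b).2 := by
  unfold applyT pvEntry
  rw [getD_map_range _ _ _ _ ha, getD_map_range _ _ _ _ hb]

theorem srcT_lt {n : Nat} {t : Bool × Bool × Bool} {i j : Nat} (hi : i < n) (hj : j < n) :
    (srcT n t i j).1 < n ∧ (srcT n t i j).2 < n := by
  obtain ⟨s, a, b⟩ := t
  cases s <;> cases a <;> cases b <;> simp [srcT] <;> omega

theorem srcT_compose {n : Nat} (t g : Bool × Bool × Bool) {i j : Nat} (hi : i < n) (hj : j < n) :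
    srcT n (composeT t g) i j = srcT n t (srcT n g i j).1 (srcT n g i j).2 := by
  obtain ⟨s1, a1, b1⟩ := t
  obtain ⟨s2, a2, b2⟩ := g
  cases s1 <;> cases a1 <;> cases b1 <;> cases s2 <;> cases a2 <;> cases b2 <;>
    simp [srcT, composeT, Prod.ext_iff] <;> omega

theorem applyT_applyT {n : Nat} {mat : List (List Int)} (t g : Bool × Bool × Bool) :
    applyT n (applyT n mat t) g = applyT n mat (composeT t g) := by
  apply sq_ext sq_applyT sq_applyT
  intro a b ha hb
  rw [entry_applyT ha hb, entry_applyT (srcT_lt ha hb).1 (srcT_lt ha hb).2,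
    entry_applyT ha hb, srcT_compose t g ha hb]

theorem applyT_id {n : Nat} {mat : List (List Int)} (h : Sq mat n) :
    applyT n mat (false, false, false) = mat := by
  apply sq_ext sq_applyT h
  intro a b ha hb
  rw [entry_applyT ha hb]
  simp [srcT]

theorem rot_applyT {n : Nat} {m : List (List Int)} (h : Sq m n) :
    rotateMatrixPort m n = applyT n m (true, true, false) := by
  apply sq_ext (rot_spec h).1 sq_applyT
  intro a b ha hb
  rw [(rot_spec h).2 a b ha hb, entry_applyT ha hb]
  simp [srcT]

theorem flip_applyT {n : Nat} {m : List (List Int)} (h : Sq m n) :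
    flipimagePort m = applyT n m (true, false, false) := by
  apply sq_ext (flip_spec h).1 sq_applyT
  intro a b ha hb
  rw [(flip_spec h).2 a b ha hb, entry_applyT ha hb]
  simp [srcT]

theorem flip2_applyT {n : Nat} {m : List (List Int)} (h : Sq m n) :
    flipimage2Port m = applyT n m (true, true, true) := by
  apply sq_ext (flip2_spec h).1 sq_applyT
  intro a b ha hb
  rw [(flip2_spec h).2 a b ha hb, entry_applyT ha hb]
  simp [srcT]

theorem step_applyT {n : Nat} {mat : List (List Int)} (t : Bool × Bool × Bool) (op : Int) :
    (if op == 0 then rotateMatrixPort (applyT n mat t) (applyT n mat t).length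
     else if op == 1 then flipimagePort (applyT n mat t)
     else flipimage2Port (applyT n mat t))
      = applyT n mat (composeT t (opTriple op)) := by
  have hS : Sq (applyT n mat t) n := sq_applyT
  by_cases h0 : op = 0
  · subst h0
    simp only [beq_self_eq_true, if_true]
    rw [hS.1, rot_applyT hS, applyT_applyT]
    simp [opTriple]
  · rw [if_neg (by simpa using h0)]
    by_cases h1 : op = 1
    · subst h1
      simp only [beq_self_eq_true, if_true]
      rw [flip_applyT hS, applyT_applyT]
      simp [opTriple]
    · rw [if_neg (by simpa using h1)]
      rw [flip2_applyT hS, applyT_applyT]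
      simp [opTriple, h0, h1]

theorem loopAB {n : Nat} (mat : List (List Int)) :
    ∀ (q : List Int) (t : Bool × Bool × Bool),
      List.foldl (fun m qi => if qi == 0 then rotateMatrixPort m m.length
        else if qi == 1 then flipimagePort m else flipimage2Port m) (applyT n mat t) q
      = applyT n mat (List.foldl (fun t op => composeT t (opTriple op)) t q)
  | [], t => rfl
  | op :: rest, t => by
    simp only [List.foldl_cons]
    rw [step_applyT t op]
    exact loopAB mat rest _

-- ===== VERDICT (by name: the statement is the Claim_ definition above) =====
theorem query_matrix_spec : Claim_equal_query_matrix := by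
  unfold Claim_equal_query_matrix
  intro mat q _ hpre
  unfold Spec_query_matrix
  rcases hpre with rfl | hsq
  · simp [query_matrix, query_matrix_alt]
  · have hS : Sq mat mat.length := ⟨rfl, hsq⟩
    have hid : applyT mat.length mat (false, false, false) = mat := applyT_id hS
    have hA : query_matrix mat q = applyT mat.length mat (netT q) := by
      unfold query_matrix netT
      conv_lhs => rw [← hid]
      exact loopAB mat q (false, false, false)
    have hB : query_matrix_alt mat q =
        if netT q = (false, false, false) then mat else applyT mat.length mat (netT q) := rfl
    rw [hA, hB]
    by_cases ht : netT q = (false, false, false)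
    · rw [if_pos ht, ht, hid]
    · rw [if_neg ht]
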